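-- pv_equiv track=rewrite | github.com/casbu/Python-Projects | Puzzle-Based Password Generator/main.py | reverse_bottom
-- ===== SOURCE A (Python) =====
-- def get_middle_index(puzzle):
--     num_rows = len(puzzle)
--     num_cols = len(puzzle[0]) if num_rows > 0 else 0
--     middle_row_index = num_rows // 2
--     middle_col_index = num_cols // 2
--     return middle_row_index, middle_col_index
--
-- def reverse_bottom(puzzle):
--     middle_row_index, middle_col_index = get_middle_index(puzzle)
--
--     #establish which rows are transformed and which are static
--     transforming_rows = puzzle[middle_row_index + 1:]
--     static_rows = puzzle[:middle_row_index + 1]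
--
--     # reverse rows below middle index
--     transformed_rows = []
--     for row in transforming_rows:
--             # reverse data excluding middle column index
--             transformed_row = row[::-1]
--             transformed_rows.append(transformed_row)
--
--     # concat reversed and remaining rows
--     new_puzzle = static_rows + transformed_rows
--
--     return new_puzzle
-- ===== SOURCE B (Python) =====
-- def reverse_bottom(puzzle):
--     mid = len(puzzle) // 2
--     return [row if i <= mid else list(reversed(row)) for i, row in enumerate(puzzle)]
-- ===== Notes on version B (the rewrite author's own statement) =====
-- stated objective: simpler
-- what changed: Replaces the two-slice partition, explicit accumulator loop and concatenation with a single indexed pass (one comprehension over enumerate) that keeps or reverses each row by its index.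
import Mathlib
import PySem

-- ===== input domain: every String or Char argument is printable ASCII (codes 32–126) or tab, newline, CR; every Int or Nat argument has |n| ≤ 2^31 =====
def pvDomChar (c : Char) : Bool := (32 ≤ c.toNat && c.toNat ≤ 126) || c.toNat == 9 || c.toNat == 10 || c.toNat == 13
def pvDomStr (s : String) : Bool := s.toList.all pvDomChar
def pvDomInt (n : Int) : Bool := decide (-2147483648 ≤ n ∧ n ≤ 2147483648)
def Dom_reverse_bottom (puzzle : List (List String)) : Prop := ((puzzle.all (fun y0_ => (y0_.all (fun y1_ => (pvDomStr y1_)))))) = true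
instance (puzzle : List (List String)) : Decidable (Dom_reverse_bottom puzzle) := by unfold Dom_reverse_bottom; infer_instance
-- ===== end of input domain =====

-- B replaces the two-slice partition + accumulator loop + concatenation with one indexed pass
-- that keeps or reverses each row by its position (objective: simpler).

-- ===== PORT A =====
-- get_middle_index: returns (num_rows // 2, num_cols // 2); only the row index is used
def get_middle_index (puzzle : List (List String)) : Int × Int :=
  let num_rows : Int := puzzle.length
  let num_cols : Int := if num_rows > 0 then (puzzle.headI.length : Int) else 0
  let middle_row_index := PySem.Int.floordiv num_rows 2
  let middle_col_index := PySem.Int.floordiv num_cols 2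
  (middle_row_index, middle_col_index)

def reverse_bottom (puzzle : List (List String)) : List (List String) :=
  let middle_row_index := (get_middle_index puzzle).1
  let transforming_rows := PySem.List.slice puzzle (some (middle_row_index + 1)) none
  let static_rows := PySem.List.slice puzzle none (some (middle_row_index + 1))
  -- row[::-1]: slice? with step -1 is always `some`; getD [] is never the default
  let transformed_rows := transforming_rows.foldl
    (fun acc row => acc ++ [(PySem.List.slice? row none none (-1)).getD []]) []
  static_rows ++ transformed_rows

-- ===== PORT B =====
-- B: one indexed pass; list(reversed(row)) is List.reverse
def reverse_bottom_alt (puzzle : List (List String)) : List (List String) :=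
  let mid := PySem.Int.floordiv (puzzle.length : Int) 2
  (PySem.List.enumerate puzzle 0).map (fun p => if p.1 ≤ mid then p.2 else p.2.reverse)

-- ===== PRECONDITION & SPEC =====
def Spec_reverse_bottom (puzzle : List (List String)) (out : List (List String)) : Prop := out = reverse_bottom_alt puzzle
instance (puzzle : List (List String)) (out : List (List String)) : Decidable (Spec_reverse_bottom puzzle out) := by unfold Spec_reverse_bottom; infer_instance

-- ===== CLAIM (what is proved, stated in full; the proofs are below) =====
def Claim_equal_reverse_bottom : Prop := ∀ (puzzle : List (List String)), Dom_reverse_bottom puzzle → Spec_reverse_bottom puzzle (reverse_bottom puzzle)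

-- ===== LEMMAS AND PROOFS =====

-- floordiv of nonneg by 2 is Nat division
theorem hdiv (n : Nat) : PySem.Int.floordiv (n : Int) 2 = ((n / 2 : Nat) : Int) := by
  simp [PySem.Int.floordiv, Int.fdiv_eq_ediv]

theorem foldl_append_singleton {α β : Type} (f : α → β) (xs : List α) (acc : List β) :
    xs.foldl (fun a r => a ++ [f r]) acc = acc ++ xs.map f := by
  induction xs generalizing acc with
  | nil => simp
  | cons x xs ih => simp [ih]

-- take/map-drop split equals the single indexed pass
theorem main_lemma (xs : List (List String)) :
    xs.take (xs.length / 2 + 1) ++ (xs.drop (xs.length / 2 + 1)).map (fun r => r.reverse) =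
    (PySem.List.enumerate xs 0).map
      (fun p => if p.1 ≤ ((xs.length / 2 : Nat) : Int) then p.2 else p.2.reverse) := by
  apply List.ext_getElem
  · simp [PySem.List.length_enumerate]
    omega
  · intro i h1 h2
    have hi : i < xs.length := by
      simpa [PySem.List.length_enumerate] using h2
    rw [List.getElem_map, PySem.List.getElem_enumerate]
    have ht : (xs.take (xs.length / 2 + 1)).length = xs.length / 2 + 1 := by
      simp; omega
    by_cases hc : i ≤ xs.length / 2
    · rw [List.getElem_append_left (by rw [ht]; omega)]
      simp only [List.getElem_take]
      rw [if_pos (by push_cast; omega)]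
    · rw [List.getElem_append_right (by rw [ht]; omega)]
      simp only [List.getElem_map, List.getElem_drop, ht]
      rw [if_neg (by push_cast; omega)]
      have hidx : xs.length / 2 + 1 + (i - (xs.length / 2 + 1)) = i := by omega
      simp only [hidx]

-- ===== VERDICT (by name: the statement is the Claim_ definition above) =====
theorem reverse_bottom_spec : Claim_equal_reverse_bottom := by
  intro puzzle _
  unfold Spec_reverse_bottom reverse_bottom reverse_bottom_alt get_middle_index
  simp only [hdiv, foldl_append_singleton, List.nil_append,
    PySem.List.slice?_none_none_neg_one, Option.getD_some]
  have h1 : ((puzzle.length / 2 : Nat) : Int) + 1 = ((puzzle.length / 2 + 1 : Nat) : Int) := by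
    push_cast; ring
  rw [h1, PySem.List.slice_from_natCast, PySem.List.slice_to_natCast, main_lemma]
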